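-- pv_equiv track=rewrite | github.com/quadjump/dsa | epi/epi_py/src/ch5_arrays/e04_advance_array.py | build_advances
-- ===== SOURCE A (Python) =====
-- from typing import Dict, List, Set
--
-- def build_advances(board: List[int]) -> List[List[int]]:
--     """
--     O(b^2).
--
--     Brute force collect all valid and invalid paths
--
--     TODO Prune invalid paths
--     TODO Fuse build/fold
--
--     # >>> build_advances([3,3,1,0,2,0,1])
--     # [[1, 3, 2]]
--     #
--     # >>> build_advances([3,2,0,0,2,0,1])
--     # []
--     #
--     # >>> build_advances([2,0,3,0,0,0])
--     # [[2, 3]]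
--     #
--     # >>> build_advances([0])
--     # [[]]
--     #
--
--     """
--     match board:
--         case []:  # Valid Path
--             return []
--         case [x]:  # Valid Path
--             return [[]]
--         case [0, _]:  # Invalid Path, unable to reach end
--             return []
--         case [move, *rest_of_board]:
--             return [
--                 [step + 1] + advance
--                 for step in range(0, min(move, len(rest_of_board)))
--                 for advance in build_advances(rest_of_board[step:])
--             ]
--         case _:
--             raise Exception("Impossible case reached")
-- ===== SOURCE B (Python) =====
-- def build_advances(board):
--     # Forward pass: which indices are reachable from index 0 (running furthest-reach).
--     flags = []
--     far = 0
--     i = 0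
--     for move in board:
--         ok = i <= far
--         if ok:
--             far = max(far, i + move)
--         flags.append(ok)
--         i += 1
--     # Backward DP: paths from each reachable suffix, computed exactly once.
--     # dp is built back to front (dp[len(dp)-1-s] = paths from the (s+1)-th next
--     # position); unreachable suffixes get [] and are never consumed by a reachable one.
--     dp = []
--     for move, ok in reversed(list(zip(board, flags))):
--         if not ok:
--             cur = []
--         elif not dp:
--             cur = [[]]
--         else:
--             cur = [[step + 1] + p
--                    for step in range(min(move, len(dp)))
--                    for p in dp[len(dp) - 1 - step]]
--         dp.append(cur)
--     return dp[-1] if dp else []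
-- ===== Notes on version B (the rewrite author's own statement) =====
-- stated objective: alternative
-- what changed: Replaced A's top-down recursion over list slices by a forward reachability scan plus a backward table that builds each reachable suffix's path list exactly once from whole-board indices, with no slicing and no re-recursion.
import Mathlib
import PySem

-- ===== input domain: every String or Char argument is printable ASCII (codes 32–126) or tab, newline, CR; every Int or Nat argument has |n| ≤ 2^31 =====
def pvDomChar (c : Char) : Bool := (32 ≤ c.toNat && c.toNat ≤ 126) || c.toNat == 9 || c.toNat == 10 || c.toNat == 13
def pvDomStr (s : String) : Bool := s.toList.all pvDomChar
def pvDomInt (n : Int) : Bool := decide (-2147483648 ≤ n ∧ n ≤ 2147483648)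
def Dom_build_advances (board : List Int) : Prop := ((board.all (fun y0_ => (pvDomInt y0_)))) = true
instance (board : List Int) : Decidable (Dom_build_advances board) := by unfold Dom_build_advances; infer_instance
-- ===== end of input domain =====

-- B replaces A's recursion over list slices by a forward reachability scan plus a backward table
-- computing each reachable suffix's path list exactly once (same values, same order).

-- ===== PORT A =====

def build_advances (board : List Int) : List (List Int) :=
  match board with
  | [] => []
  | [_] => [[]]
  | [0, _] => []
  | move :: rest =>
    (PySem.List.pyRange 0 (min move (rest.length : Int)) 1).flatMap
      (fun step =>
        (build_advances (PySem.List.slice rest (some step) none)).map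
          (fun advance => (step + 1) :: advance))
termination_by board.length
decreasing_by
  simp [PySem.List.slice_some_none]

-- ===== PORT B =====
-- forward pass of Source B as structural recursion over the board with state (i, far)
def pvReachAux (i far : Int) : List Int → List Bool
  | [] => []
  | move :: rest =>
      if i ≤ far then true :: pvReachAux (i + 1) (max far (i + move)) rest
      else false :: pvReachAux (i + 1) far rest

-- body of Source B's backward loop over reversed(list(zip(board, flags))); dp.insert(0, cur) makes it a foldr
def pvStep (mv : Int × Bool) (dp : List (List (List Int))) : List (List (List Int)) :=
  dp ++ [if !mv.2 then []
   else if dp.isEmpty then [[]]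
   else (PySem.List.pyRange 0 (min mv.1 (dp.length : Int)) 1).flatMap
      (fun step => (PySem.List.pyGetD dp ((dp.length : Int) - 1 - step) []).map (fun p => (step + 1) :: p))]

def build_advances_alt (board : List Int) : List (List Int) :=
  let dp := (board.zip (pvReachAux 0 0 board)).reverse.foldl (fun dp z => pvStep z dp) []
  if dp.isEmpty then [] else PySem.List.pyGetD dp (-1) []

-- ===== PRECONDITION & SPEC =====
def Spec_build_advances (board : List Int) (out : List (List Int)) : Prop := out = build_advances_alt board
instance (board : List Int) (out : List (List Int)) : Decidable (Spec_build_advances board out) := by unfold Spec_build_advances; infer_instance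

-- ===== CLAIM (what is proved, stated in full; the proofs are below) =====
def Claim_equal_build_advances : Prop := ∀ (board : List Int), Dom_build_advances board → Spec_build_advances board (build_advances board)

-- ===== LEMMAS AND PROOFS =====
-- proof-only helpers
def pvClosed (zs : List (Int × Bool)) : Prop :=
  ∀ k j : Nat, (hk : k < zs.length) → (hj : j < zs.length) → zs[k].2 = true →
    k < j → (j : Int) ≤ (k : Int) + min zs[k].1 ((zs.length : Int) - 1 - (k : Int)) →
    zs[j].2 = true

def pvTable : List (Int × Bool) → List (List (List Int))
  | [] => []
  | (mv, ok) :: rest =>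
      (if ok then build_advances (mv :: rest.map Prod.fst) else []) :: pvTable rest

lemma pvReachAux_length (bs : List Int) : ∀ i far, (pvReachAux i far bs).length = bs.length := by
  induction bs with
  | nil => intro i far; rfl
  | cons b bs ih => intro i far; by_cases h : i ≤ far <;> simp [pvReachAux, h, ih]

lemma pvTable_length (zs : List (Int × Bool)) : (pvTable zs).length = zs.length := by
  induction zs with
  | nil => rfl
  | cons z zs ih => obtain ⟨mv, ok⟩ := z; simp [pvTable, ih]

lemma pvTable_getElem (zs : List (Int × Bool)) : ∀ (k : Nat) (h : k < zs.length),
    (pvTable zs)[k]'(by rw [pvTable_length]; exact h) =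
      if zs[k].2 = true then build_advances ((zs.map Prod.fst).drop k) else [] := by
  induction zs with
  | nil => intro k h; simp at h
  | cons z zs ih =>
    intro k h
    obtain ⟨mv, ok⟩ := z
    cases k with
    | zero => simp [pvTable]
    | succ k => simpa [pvTable] using ih k (by simpa using h)

lemma reach_ge (bs : List Int) : ∀ (i far : Int) (j : Nat) (h : j < bs.length),
    i + j ≤ far → (pvReachAux i far bs)[j]'(by rw [pvReachAux_length]; exact h) = true := by
  induction bs with
  | nil => intro i far j h; simp at h
  | cons b bs ih =>
    intro i far j h hle
    cases j with
    | zero =>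
      have : i ≤ far := by simpa using hle
      simp [pvReachAux, this]
    | succ j =>
      by_cases hf : i ≤ far
      · simpa [pvReachAux, hf] using ih (i+1) (max far (i+b)) j (by simpa using h)
          (by have := le_max_left far (i+b); push_cast at hle ⊢; omega)
      · simpa [pvReachAux, hf] using ih (i+1) far j (by simpa using h)
          (by push_cast at hle ⊢; omega)

lemma pvClosed_cons {z : Int × Bool} {zs : List (Int × Bool)} (htail : pvClosed zs)
    (hhead : z.2 = true → ∀ (j : Nat) (hj : j < zs.length), ((j : Int) + 1) ≤ min z.1 ((zs.length : Int)) →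
      zs[j].2 = true) :
    pvClosed (z :: zs) := by
  intro k j hk hj h2 hkj hb
  cases k with
  | zero =>
    cases j with
    | zero => omega
    | succ j =>
      simp only [List.getElem_cons_succ]
      have hjlen : j < zs.length := by simpa using hj
      apply hhead (by simpa using h2) j hjlen
      have hcast : (((z :: zs).length : Int) - 1 - ((0 : Nat) : Int)) = ((zs.length : Int)) := by
        push_cast [List.length_cons]; ring
      rw [List.getElem_cons_zero, hcast] at hb
      push_cast at hb ⊢; linarith
  | succ k =>
    cases j with
    | zero => omega
    | succ j =>
      simp only [List.getElem_cons_succ] at h2 ⊢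
      apply htail k j (by simpa using hk) (by simpa using hj) h2 (by omega)
      have hcast : (((z :: zs).length : Int) - 1 - ((k+1 : Nat) : Int)) = ((zs.length : Int) - 1 - (k : Int)) := by
        push_cast [List.length_cons]; ring
      rw [List.getElem_cons_succ, hcast] at hb
      push_cast at hb ⊢; linarith

lemma closed_of_reach (bs : List Int) : ∀ i far : Int, pvClosed (bs.zip (pvReachAux i far bs)) := by
  induction bs with
  | nil => intro i far k j hk; simp at hk
  | cons b bs ih =>
    intro i far
    by_cases hf : i ≤ far
    · rw [pvReachAux, if_pos hf, List.zip_cons_cons]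
      apply pvClosed_cons (ih (i+1) (max far (i+b)))
      intro _ j hjlen hbnd
      have hjlen' : j < bs.length := by
        rw [List.length_zip, pvReachAux_length, min_self] at hjlen; exact hjlen
      have hziplen : (bs.zip (pvReachAux (i+1) (max far (i+b)) bs)).length = bs.length := by
        simp [pvReachAux_length]
      rw [List.getElem_zip]
      have hjb : ((j : Int) + 1) ≤ b := le_trans hbnd (min_le_left _ _)
      exact reach_ge bs (i+1) (max far (i+b)) j hjlen'
        (by have := le_max_right far (i+b); omega)
    · rw [pvReachAux, if_neg hf, List.zip_cons_cons]
      apply pvClosed_cons (ih (i+1) far)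
      intro habs; simp at habs

lemma pvClosed_tail {z : Int × Bool} {zs : List (Int × Bool)} (h : pvClosed (z :: zs)) :
    pvClosed zs := by
  intro k j hk hj h2 hkj hb
  have hcast : (((z :: zs).length : Int) - 1 - ((k+1 : Nat) : Int)) = ((zs.length : Int) - 1 - (k : Int)) := by
    push_cast [List.length_cons]; ring
  have := h (k+1) (j+1) (by simpa using hk) (by simpa using hj)
    (by simpa using h2) (by omega)
    (by rw [List.getElem_cons_succ, hcast]; push_cast at hb ⊢; linarith)
  simpa using this

lemma build_advances_cons (move r : Int) (rs : List Int) :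
    build_advances (move :: r :: rs) =
      (PySem.List.pyRange 0 (min move (((r :: rs).length : Nat) : Int)) 1).flatMap
        (fun step =>
          (build_advances (PySem.List.slice (r :: rs) (some step) none)).map
            (fun advance => (step + 1) :: advance)) := by
  by_cases h0 : move = 0 ∧ rs = []
  · obtain ⟨h1, h2⟩ := h0; subst h1; subst h2
    simp [build_advances, PySem.List.pyRange]
  · rw [build_advances.eq_def]
    split
    · simp_all
    · simp_all
    · exfalso; simp_all
    · rename_i heq; injection heq with h1 h2; subst h1; subst h2; rfl

lemma dp_eq (zs : List (Int × Bool)) (hcl : pvClosed zs) :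
    zs.foldr (fun z dp => pvStep z dp) [] = (pvTable zs).reverse := by
  induction zs with
  | nil => rfl
  | cons z rest ih =>
    obtain ⟨mv, ok⟩ := z
    rw [List.foldr_cons, ih (pvClosed_tail hcl), pvStep, pvTable, List.reverse_cons]
    congr 1
    congr 1
    cases ok with
    | false => simp
    | true =>
      simp only [Bool.not_true, Bool.false_eq_true, if_false]
      match rest with
      | [] => simp [build_advances, pvTable]
      | (r, rok) :: rest' =>
        rw [if_neg (by simp [pvTable])]
        rw [show ((r, rok) :: rest').map Prod.fst = r :: rest'.map Prod.fst from rfl,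
            build_advances_cons]
        rw [List.length_reverse, pvTable_length]
        simp only [List.length_cons, List.length_map]
        apply List.flatMap_congr
        intro step hstep
        rw [PySem.List.mem_pyRange_one] at hstep
        obtain ⟨hs0, hs1⟩ := hstep
        have hlt : step < (((r, rok) :: rest').length : Int) :=
          lt_of_lt_of_le hs1 (by simp)
        have hltn : step.toNat < ((r, rok) :: rest').length := by
          simp at hlt ⊢; omega
        -- the reversed-table index len-1-step
        have hlen : ((pvTable ((r, rok) :: rest')).reverse).length = ((r, rok) :: rest').length := by
          rw [List.length_reverse, pvTable_length]
        have hj0 : (0 : Int) ≤ ((((rest'.length + 1 : Nat)) : Int) - 1 - step) := by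
          simp at hlt ⊢; omega
        have hjlt : ((((rest'.length + 1 : Nat)) : Int) - 1 - step) <
            (((pvTable ((r, rok) :: rest')).reverse).length : Int) := by
          rw [hlen]; simp; omega
        rw [PySem.List.pyGetD_eq_getElem _ _ hj0 hjlt, PySem.List.slice_from _ hs0]
        have hrevidx : ((pvTable ((r, rok) :: rest')).reverse)[((((rest'.length + 1 : Nat)) : Int) - 1 - step).toNat]'(by omega) =
            (pvTable ((r, rok) :: rest'))[step.toNat]'(by rw [pvTable_length]; exact hltn) := by
          rw [List.getElem_reverse]
          congr 1
          rw [pvTable_length]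
          simp only [List.length_cons] at hltn ⊢
          omega
        rw [hrevidx, pvTable_getElem _ step.toNat hltn]
        have hflag : (((r, rok) :: rest')[step.toNat]).2 = true := by
          apply hcl 0 (step.toNat + 1) (by simp) (by simp; omega) rfl (by omega)
          simp only [List.getElem_cons_zero, List.length_cons]
          have hst : (step.toNat : Int) = step := by omega
          have e : (((rest'.length + 1 + 1 : Nat) : Int) - 1 - ((0 : Nat) : Int)) = (((rest'.length + 1 : Nat)) : Int) := by
            push_cast; ring
          rw [e]
          push_cast at hs1 ⊢
          rw [hst]
          linarith
        rw [if_pos hflag, List.map_cons]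

-- ===== VERDICT (by name: the statement is the Claim_ definition above) =====
theorem build_advances_spec : Claim_equal_build_advances := by
  intro board _
  unfold Spec_build_advances
  unfold build_advances_alt
  rw [List.foldl_reverse]
  cases board with
  | nil => simp [build_advances]
  | cons mv bs =>
    rw [dp_eq _ (closed_of_reach (mv :: bs) 0 0)]
    rw [pvReachAux, if_pos (le_refl 0), List.zip_cons_cons, pvTable]
    rw [List.reverse_cons]
    rw [if_neg (by simp)]
    rw [PySem.List.pyGetD_neg_one_append_singleton]
    simp only [if_true]
    rw [List.map_fst_zip (le_of_eq (pvReachAux_length bs (0+1) (max 0 (0+mv))).symm)]
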